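-- pv_equiv track=rewrite | github.com/wooperIsBest/wooperisbest.github.io | src/py/advent-of-code-2024/Day 9.py | first_empty_of_size
-- ===== SOURCE A (Python) =====
-- def first_empty_of_size(blocks, size):
--     i = 0
--     while i < len(blocks):
--         if blocks[i] == ".":
--             length = 1
--             while i + length < len(blocks) and blocks[i + length] == ".":
--                 length += 1
--             if i + length == len(blocks):
--                 length += 1
--             if length >= size:
--                 return i
--             i += length
--         i += 1
--     return -1
-- ===== SOURCE B (Python) =====
-- def first_empty_of_size(blocks, size):
--     run_start = None
--     for j, b in enumerate(blocks):
--         if b == ".":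
--             if run_start is None:
--                 run_start = j
--         else:
--             if run_start is not None:
--                 if j - run_start >= size:
--                     return run_start
--                 run_start = None
--     if run_start is not None and len(blocks) - run_start + 1 >= size:
--         return run_start
--     return -1
-- ===== Notes on version B (the rewrite author's own statement) =====
-- stated objective: simpler
-- what changed: Replaced A's nested while-loops (inner run-length scan plus manual index skipping) with a single flat left-to-right pass that tracks the start of the current dot-run and decides when the run ends (or at end of list, where A's +1 bump is reproduced).
import Mathlib
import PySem

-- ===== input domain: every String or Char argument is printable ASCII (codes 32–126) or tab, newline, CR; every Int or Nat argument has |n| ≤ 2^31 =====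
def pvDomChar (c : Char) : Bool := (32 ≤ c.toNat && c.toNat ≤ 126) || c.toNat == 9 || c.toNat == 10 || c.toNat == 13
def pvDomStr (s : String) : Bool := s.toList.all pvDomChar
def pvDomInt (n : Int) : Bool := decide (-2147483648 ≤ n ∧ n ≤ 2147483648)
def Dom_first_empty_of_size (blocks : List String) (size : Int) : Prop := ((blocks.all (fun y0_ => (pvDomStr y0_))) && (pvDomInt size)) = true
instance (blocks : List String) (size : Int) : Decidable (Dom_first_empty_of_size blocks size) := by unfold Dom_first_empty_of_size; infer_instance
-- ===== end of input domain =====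

-- B replaces A's nested while-loops (inner run-measuring loop + manual index skipping)
-- by a single flat pass that tracks the start of the current dot-run; same values, same O(n) cost.


-- ===== PORT A =====
-- inner while: `while i + length < len(blocks) and blocks[i+length] == ".": length += 1`
def feInner (blocks : List String) (i : Nat) (length : Nat) : Nat :=
  if h : i + length < blocks.length ∧ blocks.getD (i + length) "" = "." then
    feInner blocks i (length + 1)
  else length
termination_by blocks.length - (i + length)
decreasing_by omega

-- outer while over index i (i only ever grows, all indexing in range: getD is exact here)
def feLoop (blocks : List String) (size : Int) (i : Nat) : Int :=
  if h : i < blocks.length then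
    if blocks.getD i "" = "." then
      let len := feInner blocks i 1
      let len := if i + len = blocks.length then len + 1 else len
      if (len : Int) ≥ size then (i : Int)
      else feLoop blocks size (i + len + 1)
    else feLoop blocks size (i + 1)
  else -1
termination_by blocks.length - i
decreasing_by all_goals omega

def first_empty_of_size (blocks : List String) (size : Int) : Int :=
  feLoop blocks size 0

-- ===== PORT B =====
-- single pass: j is the current index, st the start of the current dot-run (none = not in a run)
def feGo (size : Int) (total : Nat) : List String → Nat → Option Nat → Int
  | [], _, none => -1
  | [], _, some s => if ((total - s + 1 : Nat) : Int) ≥ size then (s : Int) else -1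
  | b :: rest, j, none =>
    if b = "." then feGo size total rest (j + 1) (some j)
    else feGo size total rest (j + 1) none
  | b :: rest, j, some s =>
    if b = "." then feGo size total rest (j + 1) (some s)
    else if ((j - s : Nat) : Int) ≥ size then (s : Int)
    else feGo size total rest (j + 1) none

def first_empty_of_size_alt (blocks : List String) (size : Int) : Int :=
  feGo size blocks.length blocks 0 none

-- ===== PRECONDITION & SPEC =====
def Spec_first_empty_of_size (blocks : List String) (size : Int) (out : Int) : Prop := out = first_empty_of_size_alt blocks size
instance (blocks : List String) (size : Int) (out : Int) : Decidable (Spec_first_empty_of_size blocks size out) := by unfold Spec_first_empty_of_size; infer_instance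

-- ===== CLAIM (what is proved, stated in full; the proofs are below) =====
def Claim_equal_first_empty_of_size : Prop := ∀ (blocks : List String) (size : Int), Dom_first_empty_of_size blocks size → Spec_first_empty_of_size blocks size (first_empty_of_size blocks size)

-- ===== LEMMAS AND PROOFS =====

-- A's decision once the effective run length is known
def feAfterLen (blocks : List String) (size : Int) (s len : Nat) : Int :=
  if (len : Int) ≥ size then (s : Int) else feLoop blocks size (s + len + 1)

-- the A-side value computed once a dot-run starting at s has been scanned up to j
def feAfterRun (blocks : List String) (size : Int) (s j : Nat) : Int :=
  feAfterLen blocks size s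
    (if s + feInner blocks s (j - s) = blocks.length then feInner blocks s (j - s) + 1
     else feInner blocks s (j - s))

-- in the some-s state, B computes exactly what A computes for the run starting at s,
-- provided the two sides agree from every index beyond j onward
lemma feGo_some (k : Nat) (blocks : List String) (size : Int) (s j : Nat)
    (hsj : s < j) (hjle : j ≤ blocks.length) (hk : blocks.length - j < k)
    (HP : ∀ i', j ≤ i' → feLoop blocks size i' = feGo size blocks.length (blocks.drop i') i' none) :
    feGo size blocks.length (blocks.drop j) j (some s) = feAfterRun blocks size s j := by
  induction k generalizing j with
  | zero => omega
  | succ k ih =>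
    by_cases hj : j < blocks.length
    · rw [List.drop_eq_getElem_cons hj]
      by_cases hdot : blocks[j] = "."
      · -- current char continues the run
        simp only [feGo, if_pos hdot]
        rw [ih (j + 1) (by omega) (by omega) (by omega)
            (fun i' hi' => HP i' (by omega))]
        unfold feAfterRun
        have hstep : feInner blocks s (j + 1 - s) = feInner blocks s (j - s) := by
          conv_rhs => rw [feInner]
          rw [dif_pos]
          · congr 1; omega
          · refine ⟨by omega, ?_⟩
            have h : s + (j - s) = j := by omega
            rw [h, List.getD_eq_getElem _ _ hj]; exact hdot
        rw [hstep]
      · -- run ends strictly inside the list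
        have hinner : feInner blocks s (j - s) = j - s := by
          rw [feInner, dif_neg]
          intro ⟨h1, h2⟩
          have h : s + (j - s) = j := by omega
          rw [h, List.getD_eq_getElem _ _ hj] at h2
          exact hdot h2
        simp only [feGo, if_neg hdot]
        unfold feAfterRun feAfterLen
        rw [hinner, if_neg (show ¬ (s + (j - s) = blocks.length) by omega)]
        by_cases hge : ((j - s : Nat) : Int) ≥ size
        · rw [if_pos hge, if_pos hge]
        · rw [if_neg hge, if_neg hge,
              show s + (j - s) + 1 = j + 1 by omega, HP (j + 1) (by omega)]
    · -- j = blocks.length : end of list, A's end-of-list +1 bump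
      have hdrop : blocks.drop j = [] := List.drop_eq_nil_of_le (by omega)
      rw [hdrop]
      have hinner : feInner blocks s (j - s) = j - s := by
        rw [feInner, dif_neg]
        intro ⟨h1, _⟩; omega
      simp only [feGo]
      unfold feAfterRun feAfterLen
      rw [hinner, if_pos (show s + (j - s) = blocks.length by omega),
          show ((blocks.length - s + 1 : Nat) : Int) = ((j - s + 1 : Nat) : Int) by congr 1; omega]
      by_cases hge : ((j - s + 1 : Nat) : Int) ≥ size
      · rw [if_pos hge, if_pos hge]
      · rw [if_neg hge, if_neg hge, feLoop, dif_neg (by omega)]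

lemma main_loop (k : Nat) (blocks : List String) (size : Int) (i : Nat)
    (hk : blocks.length - i < k) :
    feLoop blocks size i = feGo size blocks.length (blocks.drop i) i none := by
  induction k generalizing i with
  | zero => omega
  | succ k ih =>
    by_cases hi : i < blocks.length
    · rw [List.drop_eq_getElem_cons hi, feLoop, dif_pos hi,
          List.getD_eq_getElem _ _ hi]
      by_cases hdot : blocks[i] = "."
      · simp only [feGo, if_pos hdot]
        rw [feGo_some k blocks size i (i + 1) (by omega) (by omega) (by omega)
            (fun i' hi' => ih i' (by omega))]
        unfold feAfterRun feAfterLen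
        rw [show i + 1 - i = 1 by omega]
      · simp only [feGo, if_neg hdot]
        exact ih (i + 1) (by omega)
    · rw [feLoop, dif_neg hi, List.drop_eq_nil_of_le (by omega)]
      simp [feGo]

-- ===== VERDICT (by name: the statement is the Claim_ definition above) =====
theorem first_empty_of_size_spec : Claim_equal_first_empty_of_size := by
  intro blocks size _
  unfold Spec_first_empty_of_size first_empty_of_size first_empty_of_size_alt
  simpa using main_loop (blocks.length + 1) blocks size 0 (by omega)
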